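-- pv_equiv track=rewrite | github.com/syntaxe-devmessy/ORLYNE-A12B--IA | src/code_engine/sql_executor.py | _split_queries
-- ===== SOURCE A (Python) =====
-- from typing import Dict, Any, List
--
-- def _split_queries(sql: str) -> List[str]:
--     """Sépare les requêtes SQL par point-virgule"""
--     queries = []
--     current_query = []
--     in_string = False
--     string_char = None
--
--     for char in sql:
--         if char in ['"', "'"] and not in_string:
--             in_string = True
--             string_char = char
--             current_query.append(char)
--         elif char == string_char and in_string:
--             in_string = False
--             string_char = None
--             current_query.append(char)
--         elif char == ';' and not in_string:
--             queries.append(''.join(current_query))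
--             current_query = []
--         else:
--             current_query.append(char)
--
--     # Ajouter la dernière requête si elle existe
--     if current_query:
--         queries.append(''.join(current_query))
--
--     return [q.strip() for q in queries if q.strip()]
-- ===== SOURCE B (Python) =====
-- def _split_queries(sql: str):
--     # One scan recording cut positions of unquoted ';', then slice the string
--     # at those boundaries instead of accumulating a per-character buffer.
--     cuts = []
--     in_string = False
--     string_char = None
--     for i, char in enumerate(sql):
--         if in_string:
--             if char == string_char:
--                 in_string = False
--                 string_char = None
--         elif char == '"' or char == "'":
--             in_string = True
--             string_char = char
--         elif char == ';':
--             cuts.append(i)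
--     segments = []
--     start = 0
--     for c in cuts:
--         segments.append(sql[start:c])
--         start = c + 1
--     segments.append(sql[start:])
--     return [q.strip() for q in segments if q.strip()]
-- ===== Notes on version B (the rewrite author's own statement) =====
-- stated objective: alternative
-- what changed: Instead of accumulating a per-character buffer and joining it at each separator, B records the positions of unquoted semicolons in one scan and then produces the segments by string slicing between consecutive cut positions.
import Mathlib
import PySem

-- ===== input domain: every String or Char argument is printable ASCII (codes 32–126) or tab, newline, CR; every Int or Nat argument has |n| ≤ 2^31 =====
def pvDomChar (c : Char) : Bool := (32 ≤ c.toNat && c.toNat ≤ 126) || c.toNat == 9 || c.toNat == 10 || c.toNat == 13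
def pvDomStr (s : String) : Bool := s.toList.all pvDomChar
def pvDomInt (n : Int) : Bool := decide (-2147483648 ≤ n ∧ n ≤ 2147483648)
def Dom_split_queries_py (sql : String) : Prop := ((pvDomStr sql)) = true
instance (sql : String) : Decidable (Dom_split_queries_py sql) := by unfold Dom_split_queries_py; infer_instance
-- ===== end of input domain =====

-- B records the cut positions of unquoted semicolons in one scan, then slices the string between them;
-- A accumulates a character buffer per segment.  Same return value on every input (proved below).

-- ===== PORT A =====
-- the for-loop of A: state = (queries, current_query, in_string, string_char)
def pvALoop : List Char → List (List Char) → List Char → Bool → Option Char → List (List Char)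
  | [], qs, cur, _, _ => if cur ≠ [] then qs ++ [cur] else qs
  | c :: r, qs, cur, ins, sc =>
    if (c = '"' ∨ c = '\'') ∧ ins = false then pvALoop r qs (cur ++ [c]) true (some c)
    else if some c = sc ∧ ins = true then pvALoop r qs (cur ++ [c]) false none
    else if c = ';' ∧ ins = false then pvALoop r (qs ++ [cur]) [] ins sc
    else pvALoop r qs (cur ++ [c]) ins sc

def split_queries_py (sql : String) : List String :=
  let qs := pvALoop sql.toList [] [] false none
  (qs.filter (fun q => PySem.Chars.strip q ≠ [])).map (fun q => String.ofList (PySem.Chars.strip q))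

-- ===== PORT B =====
-- first loop of B: positions of the unquoted semicolons (i is the enumerate counter)
def pvBCuts : List Char → Nat → Bool → Option Char → List Nat
  | [], _, _, _ => []
  | c :: r, i, ins, sc =>
    if ins then (if some c = sc then pvBCuts r (i+1) false none else pvBCuts r (i+1) ins sc)
    else if c = '"' ∨ c = '\'' then pvBCuts r (i+1) true (some c)
    else if c = ';' then i :: pvBCuts r (i+1) ins sc
    else pvBCuts r (i+1) ins sc

-- second loop of B: slice s between consecutive cut positions (sql[start:c]; final sql[start:])
def pvBSegs (s : List Char) : List Nat → Nat → List (List Char)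
  | [], start => [s.drop start]
  | c :: cs, start => ((s.drop start).take (c - start)) :: pvBSegs s cs (c + 1)

def split_queries_py_alt (sql : String) : List String :=
  let s := sql.toList
  let segs := pvBSegs s (pvBCuts s 0 false none) 0
  (segs.filter (fun q => PySem.Chars.strip q ≠ [])).map (fun q => String.ofList (PySem.Chars.strip q))

-- ===== PRECONDITION & SPEC =====
def Spec_split_queries_py (sql : String) (out : List String) : Prop := out = split_queries_py_alt sql
instance (sql : String) (out : List String) : Decidable (Spec_split_queries_py sql out) := by unfold Spec_split_queries_py; infer_instance

-- ===== CLAIM (what is proved, stated in full; the proofs are below) =====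
def Claim_equal_split_queries_py : Prop := ∀ (sql : String), Dom_split_queries_py sql → Spec_split_queries_py sql (split_queries_py sql)

-- ===== LEMMAS AND PROOFS =====

-- the final list comprehension, shared shape of both programs' last line
def pvClean (xs : List (List Char)) : List String :=
  (xs.filter (fun q => PySem.Chars.strip q ≠ [])).map (fun q => String.ofList (PySem.Chars.strip q))

theorem pvClean_append (a b : List (List Char)) : pvClean (a ++ b) = pvClean a ++ pvClean b := by
  simp [pvClean, List.filter_append]

theorem pvClean_nil_elem : pvClean [([] : List Char)] = [] := by decide

theorem pvSeg_snoc (s : List Char) (start i : Nat) (hs : start ≤ i) (hi : i < s.length) :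
    (s.drop start).take (i - start) ++ [s[i]] = (s.drop start).take (i + 1 - start) := by
  have hlen : i - start < (s.drop start).length := by simp; omega
  have hget : (s.drop start)[i - start]'hlen = s[i] := by rw [List.getElem_drop]; congr 1; omega
  have h3 := List.take_concat_get hlen
  rw [List.concat_eq_append, hget] at h3
  rw [h3]; congr 1; omega

theorem pvClean_cons (x : List Char) (l : List (List Char)) :
    pvClean (x :: l) = pvClean [x] ++ pvClean l := pvClean_append [x] l

theorem pvMain (s : List Char) : ∀ (r : List Char) (i start : Nat) (qs : List (List Char))
    (ins : Bool) (sc : Option Char), r = s.drop i → start ≤ i → i ≤ s.length →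
    pvClean (pvALoop r qs ((s.drop start).take (i - start)) ins sc) =
      pvClean qs ++ pvClean (pvBSegs s (pvBCuts r i ins sc) start) := by
  intro r
  induction r with
  | nil =>
    intro i start qs ins sc hr hsi hilen
    have hi : s.length ≤ i := by
      have := congrArg List.length hr
      simp at this
      omega
    have hcur : (s.drop start).take (i - start) = s.drop start := by
      apply List.take_of_length_le
      simp; omega
    simp only [pvALoop, pvBCuts, pvBSegs, hcur]
    by_cases h : s.drop start = []
    · simp [h, pvClean_nil_elem]
    · simp [h, pvClean_append]
  | cons c r ih =>
    intro i start qs ins sc hr hsi hilen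
    have hi : i < s.length := by
      by_contra h
      rw [List.drop_eq_nil_of_le (by omega)] at hr
      exact List.cons_ne_nil c r hr
    obtain ⟨hc, hr'⟩ : s[i] = c ∧ r = s.drop (i+1) := by
      have h := List.drop_eq_getElem_cons hi
      rw [← hr] at h
      exact ⟨(List.cons.injEq ..▸ h).1.symm, (List.cons.injEq ..▸ h).2⟩
    have hsnoc : ((s.drop start).take (i - start)) ++ [c] = (s.drop start).take (i + 1 - start) := by
      rw [← hc]; exact pvSeg_snoc s start i hsi hi
    simp only [pvALoop, pvBCuts]
    cases ins with
    | true =>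
      by_cases hclose : some c = sc
      · rw [if_neg (show ¬((c = '"' ∨ c = '\'') ∧ true = false) by simp),
            if_pos (show some c = sc ∧ true = true from ⟨hclose, rfl⟩),
            if_pos (show true = true from rfl),
            if_pos hclose, hsnoc]
        exact ih (i+1) start qs false none hr' (by omega) (by omega)
      · rw [if_neg (show ¬((c = '"' ∨ c = '\'') ∧ true = false) by simp),
            if_neg (show ¬(some c = sc ∧ true = true) by simp [hclose]),
            if_neg (show ¬(c = ';' ∧ true = false) by simp),
            if_pos (show true = true from rfl),
            if_neg hclose, hsnoc]
        exact ih (i+1) start qs true sc hr' (by omega) (by omega)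
    | false =>
      by_cases hq : c = '"' ∨ c = '\''
      · rw [if_pos (show (c = '"' ∨ c = '\'') ∧ false = false from ⟨hq, rfl⟩),
            if_neg (show ¬(false = true) by simp),
            if_pos hq, hsnoc]
        exact ih (i+1) start qs true (some c) hr' (by omega) (by omega)
      · by_cases hsemi : c = ';'
        · rw [if_neg (show ¬((c = '"' ∨ c = '\'') ∧ false = false) by tauto),
              if_neg (show ¬(some c = sc ∧ false = true) by simp),
              if_pos (show c = ';' ∧ false = false from ⟨hsemi, rfl⟩),
              if_neg (show ¬(false = true) by simp),
              if_neg hq, if_pos hsemi]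
          have ihx := ih (i+1) (i+1) (qs ++ [(s.drop start).take (i - start)]) false sc hr'
            (by omega) (by omega)
          simp only [Nat.sub_self, List.take_zero] at ihx
          rw [ihx, pvClean_append]
          conv_rhs => rw [pvBSegs, pvClean_cons]
          rw [List.append_assoc]
        · rw [if_neg (show ¬((c = '"' ∨ c = '\'') ∧ false = false) by tauto),
              if_neg (show ¬(some c = sc ∧ false = true) by simp),
              if_neg (show ¬(c = ';' ∧ false = false) by tauto),
              if_neg (show ¬(false = true) by simp),
              if_neg hq, if_neg hsemi, hsnoc]
          exact ih (i+1) start qs false sc hr' (by omega) (by omega)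

-- ===== VERDICT (by name: the statement is the Claim_ definition above) =====
theorem split_queries_py_spec : Claim_equal_split_queries_py := by
  intro sql _
  show _ = _
  have h := pvMain sql.toList sql.toList 0 0 [] false none rfl (le_refl 0) (Nat.zero_le _)
  simp only [List.drop_zero, List.take_zero, Nat.sub_zero] at h
  simpa [split_queries_py, split_queries_py_alt, pvClean] using h
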